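-- pv_equiv track=rewrite | github.com/Arvind595/Programming-Languages- | PYTHON/sqprim.py | primesquare
-- ===== SOURCE A (Python) =====
-- def squaretest(num):
--     sqlist=[]
--     i=1
--     while i**2 <= num:
--         sqlist.append(i**2)
--         i+=1
--     return sqlist
--
-- def primecheck(num):
--     primelist=[]
--     for i in range(2,num + 1):
--         for p in range(2,i):
--             if (i % p) == 0:
--                 break
--         else:
--             primelist.append(i)
--     return primelist
--
-- def primesquare(l):
--     if len(l)==1:
--         primelist = primecheck(l[0])
--         sqlist = squaretest(l[0])
--         return (l[0] in primelist) or (l[0] in sqlist)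
--     else:
--         ol=[]
--         el=[]
--         for i in range(0,len(l),2):
--             ol.append(l[i])
--         for p in range (1, len(l),2):
--             el.append(l[p])
--         primelist = primecheck(max(l))
--         sqlist = squaretest (max(l))
--
--         check =((all(x in primelist for x in el)) == True and (all(y in sqlist
-- for y in ol)) == True) or ((all(x in primelist for x in ol)) == True and (all(y
-- in sqlist for y in el)) == True)
--
--         return check
-- ===== SOURCE B (Python) =====
-- def _is_prime(n):
--     if n < 2:
--         return False
--     d = 2
--     while d * d <= n:
--         if n % d == 0:
--             return False
--         d += 1
--     return True
--
--
-- def _is_square(n):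
--     if n < 1:
--         return False
--     i = 1
--     while i * i < n:
--         i += 1
--     return i * i == n
--
--
-- def primesquare(l):
--     if len(l) == 1:
--         return _is_prime(l[0]) or _is_square(l[0])
--     a = all(_is_square(x) if i % 2 == 0 else _is_prime(x) for i, x in enumerate(l))
--     b = all(_is_prime(x) if i % 2 == 0 else _is_square(x) for i, x in enumerate(l))
--     return a or b
-- ===== Notes on version B (the rewrite author's own statement) =====
-- stated objective: faster
-- what changed: B drops A's prime-list/square-list construction and per-element membership scans entirely: each element is tested directly with an early-exit trial division up to sqrt(n) and an incremental square search, in one pass over enumerate(l) split by index parity.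
-- outside the precondition, e.g. on primesquare([]): A raises ValueError, B returns True
import Mathlib
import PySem

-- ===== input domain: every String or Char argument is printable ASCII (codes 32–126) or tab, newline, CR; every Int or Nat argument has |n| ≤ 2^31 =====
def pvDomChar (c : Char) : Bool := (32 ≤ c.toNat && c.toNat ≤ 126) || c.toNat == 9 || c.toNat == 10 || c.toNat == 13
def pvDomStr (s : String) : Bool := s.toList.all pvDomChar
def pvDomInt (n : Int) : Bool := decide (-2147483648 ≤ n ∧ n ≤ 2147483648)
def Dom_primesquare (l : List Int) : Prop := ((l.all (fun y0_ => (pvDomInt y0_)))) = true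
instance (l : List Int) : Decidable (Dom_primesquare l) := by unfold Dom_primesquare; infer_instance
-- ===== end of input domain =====

-- B replaces A's prime-list/square-list construction + membership scans by direct per-element
-- tests (early-exit trial division up to √n, incremental square search) in one pass over
-- enumerate(l); measurably faster since A enumerates all primes up to max(l) by full trial division.
-- Equivalence is over the return value on non-empty lists; A raises ValueError on [] (max([])).


-- ===== PORT A =====
-- termination helper for the three hand-written loops (cited by name in decreasing_by)
theorem pv_le_sq (i : Nat) : (i : Int) ≤ (i : Int) * i := by
  have h : i ≤ i * i := by
    cases i with
    | zero => simp
    | succ k => exact Nat.le_mul_of_pos_left _ (Nat.succ_pos k)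
  exact_mod_cast h

def squaretestAux (num : Int) (i : Nat) (acc : List Int) : List Int :=
  if h : (i : Int) ^ 2 ≤ num then squaretestAux num (i + 1) (acc ++ [(i : Int) ^ 2]) else acc
termination_by (num + 1 - i).toNat
decreasing_by
  have h2 : (i : Int) * i ≤ num := by rw [pow_two] at h; exact h
  have := pv_le_sq i
  omega

def squaretest (num : Int) : List Int := squaretestAux num 1 []

def primecheck (num : Int) : List Int :=
  (PySem.List.pyRange 2 (num + 1)).foldl
    (fun acc i =>
      if !(PySem.List.pyRange 2 i).any (fun p => PySem.Int.mod i p == 0) then acc ++ [i] else acc) []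

def primesquare (l : List Int) : Bool :=
  if l.length = 1 then
    let x := PySem.List.pyGetD l 0 0
    (primecheck x).contains x || (squaretest x).contains x
  else
    match PySem.List.max? l (fun y => y) with
    | none => false  -- unreachable under Pre_primesquare: Python's max([]) raises ValueError
    | some m =>
      let ol := (PySem.List.pyRange 0 (l.length) 2).foldl (fun acc i => acc ++ [PySem.List.pyGetD l i 0]) []
      let el := (PySem.List.pyRange 1 (l.length) 2).foldl (fun acc p => acc ++ [PySem.List.pyGetD l p 0]) []
      let primelist := primecheck m
      let sqlist := squaretest m
      (el.all (fun x => primelist.contains x) && ol.all (fun y => sqlist.contains y)) ||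
        (ol.all (fun x => primelist.contains x) && el.all (fun y => sqlist.contains y))

-- ===== PORT B =====
def isPrimeAux (n : Int) (d : Nat) : Bool :=
  if h : (d : Int) * d ≤ n then
    if PySem.Int.mod n d == 0 then false else isPrimeAux n (d + 1)
  else true
termination_by (n + 1 - d).toNat
decreasing_by
  have := pv_le_sq d
  omega

def isPrime (n : Int) : Bool := if n < 2 then false else isPrimeAux n 2

def isSquareAux (n : Int) (i : Nat) : Bool :=
  if h : (i : Int) * i < n then isSquareAux n (i + 1) else (i : Int) * i == n
termination_by (n - i).toNat
decreasing_by
  have := pv_le_sq i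
  omega

def isSquare (n : Int) : Bool := if n < 1 then false else isSquareAux n 1

def primesquare_alt (l : List Int) : Bool :=
  if l.length = 1 then
    isPrime (PySem.List.pyGetD l 0 0) || isSquare (PySem.List.pyGetD l 0 0)
  else
    let a := (PySem.List.enumerate l).all (fun p =>
      if PySem.Int.mod p.1 2 == 0 then isSquare p.2 else isPrime p.2)
    let b := (PySem.List.enumerate l).all (fun p =>
      if PySem.Int.mod p.1 2 == 0 then isPrime p.2 else isSquare p.2)
    a || b

-- ===== PRECONDITION & SPEC =====
-- Pre_ excludes only the empty list, on which Python's max([]) raises ValueError.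
def Pre_primesquare (l : List Int) : Prop := l ≠ []
instance (l : List Int) : Decidable (Pre_primesquare l) := by unfold Pre_primesquare; infer_instance
def pvWitness_primesquare : List Int := [2, 4]

def Spec_primesquare (l : List Int) (out : Bool) : Prop := out = primesquare_alt l
instance (l : List Int) (out : Bool) : Decidable (Spec_primesquare l out) := by unfold Spec_primesquare; infer_instance

-- ===== CLAIM (what is proved, stated in full; the proofs are below) =====
def Claim_equal_primesquare : Prop := ∀ (l : List Int), Dom_primesquare l → Pre_primesquare l → Spec_primesquare l (primesquare l)

-- ===== LEMMAS AND PROOFS =====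

theorem mem_squaretestAux (num : Int) (i : Nat) (acc : List Int) (x : Int) :
    x ∈ squaretestAux num i acc ↔
      x ∈ acc ∨ ∃ j : Nat, i ≤ j ∧ (j : Int) * j ≤ num ∧ (j : Int) * j = x := by
  induction i, acc using squaretestAux.induct num with
  | case1 i acc h ih =>
    rw [squaretestAux, dif_pos h, ih]
    rw [pow_two] at h
    constructor
    · rintro (hm | ⟨j, hj, h1, h2⟩)
      · rcases List.mem_append.mp hm with hm | hm
        · exact Or.inl hm
        · simp at hm
          exact Or.inr ⟨i, le_refl _, by rw [pow_two] at hm; omega, by rw [pow_two] at hm; omega⟩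
      · exact Or.inr ⟨j, by omega, h1, h2⟩
    · rintro (hm | ⟨j, hj, h1, h2⟩)
      · exact Or.inl (List.mem_append.mpr (Or.inl hm))
      · rcases Nat.eq_or_lt_of_le hj with rfl | hlt
        · exact Or.inl (List.mem_append.mpr (Or.inr (by simp [pow_two]; omega)))
        · exact Or.inr ⟨j, by omega, h1, h2⟩
  | case2 i acc h =>
    rw [squaretestAux, dif_neg h]
    rw [pow_two] at h
    push Not at h
    constructor
    · exact Or.inl
    · rintro (hm | ⟨j, hj, h1, h2⟩)
      · exact hm
      · exfalso
        have : (i : Int) * i ≤ (j : Int) * j := by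
          have := Nat.mul_le_mul hj hj
          exact_mod_cast this
        omega

theorem mem_squaretest (num x : Int) :
    x ∈ squaretest num ↔ ∃ j : Nat, 1 ≤ j ∧ (j : Int) * j ≤ num ∧ (j : Int) * j = x := by
  rw [squaretest, mem_squaretestAux]
  simp

theorem isSquareAux_iff (n : Int) (i : Nat) :
    isSquareAux n i = true ↔ ∃ j : Nat, i ≤ j ∧ (j : Int) * j = n := by
  induction i using isSquareAux.induct n with
  | case1 i h ih =>
    rw [isSquareAux, dif_pos h, ih]
    constructor
    · rintro ⟨j, hj, h2⟩; exact ⟨j, by omega, h2⟩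
    · rintro ⟨j, hj, h2⟩
      refine ⟨j, ?_, h2⟩
      rcases Nat.eq_or_lt_of_le hj with rfl | hlt
      · omega
      · omega
  | case2 i h =>
    rw [isSquareAux, dif_neg h]
    push Not at h
    constructor
    · intro he
      exact ⟨i, le_refl _, by simpa using he⟩
    · rintro ⟨j, hj, h2⟩
      have hmono : (i : Int) * i ≤ (j : Int) * j := by
        have := Nat.mul_le_mul hj hj
        exact_mod_cast this
      have : (i : Int) * i = n := by omega
      simpa using this

theorem isSquare_iff (n : Int) :
    isSquare n = true ↔ ∃ j : Nat, 1 ≤ j ∧ (j : Int) * j = n := by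
  rw [isSquare]
  split_ifs with h
  · simp only [false_iff]
    rintro ⟨j, hj, h2⟩
    have : (1 : Int) * 1 ≤ (j : Int) * j := by
      have := Nat.mul_le_mul hj hj
      exact_mod_cast this
    omega
  · exact isSquareAux_iff n 1

theorem square_bridge (num x : Int) (hx : x ≤ num) :
    (squaretest num).contains x = isSquare x := by
  have hiff : (x ∈ squaretest num) ↔ isSquare x = true := by
    rw [mem_squaretest, isSquare_iff]
    constructor
    · rintro ⟨j, h1, h2, h3⟩; exact ⟨j, h1, h3⟩
    · rintro ⟨j, h1, h3⟩; exact ⟨j, h1, by omega, h3⟩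
  cases hb : isSquare x <;> rw [hb] at hiff <;> simp at hiff <;> simp [hiff]

theorem mem_primecheck (num x : Int) :
    x ∈ primecheck num ↔
      2 ≤ x ∧ x < num + 1 ∧ ∀ p : Int, 2 ≤ p → p < x → ¬ PySem.Int.mod x p = 0 := by
  rw [primecheck]
  rw [PySem.List.foldl_append_if_eq_filter
        (fun i => !(PySem.List.pyRange 2 i).any (fun p => PySem.Int.mod i p == 0))]
  simp [List.mem_filter, PySem.List.mem_pyRange_one]
  tauto

theorem isPrimeAux_iff (n : Int) (d : Nat) :
    isPrimeAux n d = true ↔ ∀ e : Nat, d ≤ e → (e : Int) * e ≤ n → ¬ PySem.Int.mod n e = 0 := by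
  induction d using isPrimeAux.induct n with
  | case1 d h hmod =>
    rw [isPrimeAux, dif_pos h, if_pos hmod]
    refine iff_of_false (by simp) ?_
    intro hall
    exact hall d (le_refl _) h (by simpa using hmod)
  | case2 d h hmod ih =>
    rw [isPrimeAux, dif_pos h, if_neg hmod, ih]
    constructor
    · intro hall e he1 he2 hm
      rcases Nat.eq_or_lt_of_le he1 with rfl | hlt
      · exact hmod (by simpa using hm)
      · exact hall e (by omega) he2 hm
    · intro hall e he1 he2 hm
      exact hall e (by omega) he2 hm
  | case3 d h =>
    rw [isPrimeAux, dif_neg h]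
    refine iff_of_true rfl ?_
    intro e he1 he2 hm
    have hmono : (d : Int) * d ≤ (e : Int) * e := by
      have := Nat.mul_le_mul he1 he1
      exact_mod_cast this
    omega

theorem isPrime_iff (n : Int) :
    isPrime n = true ↔ 2 ≤ n ∧ ∀ e : Nat, 2 ≤ e → (e : Int) * e ≤ n → ¬ PySem.Int.mod n e = 0 := by
  rw [isPrime]
  split_ifs with h
  · simp only [false_iff]
    rintro ⟨h2, _⟩; omega
  · rw [isPrimeAux_iff]
    constructor
    · intro hall
      refine ⟨by omega, ?_⟩
      intro e he1 he2; exact hall e he1 he2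
    · rintro ⟨_, hall⟩
      intro e he1 he2; exact hall e he1 he2

theorem trialdiv_iff (x : Int) (_hx : 2 ≤ x) :
    (∀ p : Int, 2 ≤ p → p < x → ¬ PySem.Int.mod x p = 0) ↔
      (∀ e : Nat, 2 ≤ e → (e : Int) * e ≤ x → ¬ PySem.Int.mod x e = 0) := by
  constructor
  · intro hall e he1 he2 hm
    have he1' : (2 : Int) ≤ (e : Int) := by exact_mod_cast he1
    have hlt : (e : Int) < x := by nlinarith
    exact hall e he1' hlt hm
  · intro hall p hp1 hp2 hm
    rw [PySem.Int.mod_eq_zero_iff_dvd] at hm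
    rcases hm with ⟨q, hq⟩
    have hp0 : 0 < p := by omega
    have hq2 : 2 ≤ q := by nlinarith
    set m : Int := min p q with hmdef
    have hm2 : 2 ≤ m := le_min hp1 hq2
    have hmm : m * m ≤ x := by
      have h1 : m ≤ p := min_le_left _ _
      have h2 : m ≤ q := min_le_right _ _
      calc m * m ≤ p * q := by nlinarith
        _ = x := hq.symm
    have hdvd : m ∣ x := by
      rcases le_total p q with hpq | hpq
      · have : m = p := min_eq_left hpq
        exact ⟨q, by rw [this]; exact hq⟩
      · have : m = q := min_eq_right hpq
        exact ⟨p, by rw [this]; rw [hq]; ring⟩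
    have hc : ((m.toNat : Int)) = m := Int.toNat_of_nonneg (by omega)
    exact hall m.toNat (by omega) (by rw [hc]; exact hmm)
      (by rw [hc, PySem.Int.mod_eq_zero_iff_dvd]; exact hdvd)

theorem prime_bridge (num x : Int) (hx : x ≤ num) :
    (primecheck num).contains x = isPrime x := by
  have hiff : (x ∈ primecheck num) ↔ isPrime x = true := by
    rw [mem_primecheck, isPrime_iff]
    constructor
    · rintro ⟨h1, h2, h3⟩
      exact ⟨h1, (trialdiv_iff x h1).mp h3⟩
    · rintro ⟨h1, h3⟩
      exact ⟨h1, by omega, (trialdiv_iff x h1).mpr h3⟩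
  cases hb : isPrime x <;> rw [hb] at hiff <;> simp at hiff <;> simp [hiff]

-- membership-respecting congruence for List.all (List.all_congr needs the functions equal everywhere)
theorem all_congr_mem {α : Type} {xs : List α} {p q : α → Bool} (h : ∀ a ∈ xs, p a = q a) :
    xs.all p = xs.all q := by
  rw [Bool.eq_iff_iff]
  simp only [List.all_eq_true]
  exact ⟨fun H a ha => (h a ha) ▸ H a ha, fun H a ha => (h a ha) ▸ H a ha⟩

-- parity split: one pass over range(0,n) with an even/odd test = the two strided ranges
theorem parity_all (n : Int) (f g : Int → Bool) :
    ((PySem.List.pyRange 0 n).all (fun j => if PySem.Int.mod j 2 == 0 then f j else g j)) =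
      ((PySem.List.pyRange 0 n 2).all f && (PySem.List.pyRange 1 n 2).all g) := by
  rw [Bool.eq_iff_iff]
  simp only [Bool.and_eq_true, List.all_eq_true, PySem.List.mem_pyRange_one,
    PySem.List.mem_pyRange_iff_of_pos (by norm_num : (0:Int) < 2)]
  constructor
  · intro h
    constructor
    · rintro j ⟨h0, h1, h2⟩
      have := h j ⟨h0, h1⟩
      rw [if_pos (by rw [beq_iff_eq, PySem.Int.mod_eq_zero_iff_dvd]; omega)] at this
      exact this
    · rintro j ⟨h0, h1, h2⟩
      have := h j ⟨by omega, h1⟩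
      rw [if_neg (by rw [beq_iff_eq, PySem.Int.mod_eq_zero_iff_dvd]; omega)] at this
      exact this
  · rintro ⟨he, ho⟩ j ⟨h0, h1⟩
    by_cases hpar : (2 : Int) ∣ j
    · rw [if_pos (by rw [beq_iff_eq, PySem.Int.mod_eq_zero_iff_dvd]; exact hpar)]
      exact he j ⟨h0, h1, by omega⟩
    · rw [if_neg (by rw [beq_iff_eq, PySem.Int.mod_eq_zero_iff_dvd]; exact hpar)]
      exact ho j ⟨by omega, h1, by omega⟩

theorem primesquare_main (l : List Int) (hpre : l ≠ []) : primesquare l = primesquare_alt l := by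
  rw [primesquare, primesquare_alt]
  by_cases hlen : l.length = 1
  · rw [if_pos hlen, if_pos hlen]
    show ((primecheck (PySem.List.pyGetD l 0 0)).contains (PySem.List.pyGetD l 0 0) ||
        (squaretest (PySem.List.pyGetD l 0 0)).contains (PySem.List.pyGetD l 0 0)) =
        (isPrime (PySem.List.pyGetD l 0 0) || isSquare (PySem.List.pyGetD l 0 0))
    rw [prime_bridge _ _ (le_refl _), square_bridge _ _ (le_refl _)]
  · rw [if_neg hlen, if_neg hlen]
    obtain ⟨m, hm⟩ : ∃ m, PySem.List.max? l (fun y => y) = some m := by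
      cases h : PySem.List.max? l (fun y => y) with
      | none => exact absurd ((PySem.List.max?_eq_none_iff l _).mp h) hpre
      | some m => exact ⟨m, rfl⟩
    rw [hm]
    have hmax : ∀ y ∈ l, y ≤ m := PySem.List.max?_isMax hm
    have hbridge : ∀ j : Int, 0 ≤ j → j < (l.length : Int) →
        ((primecheck m).contains (PySem.List.pyGetD l j 0) = isPrime (PySem.List.pyGetD l j 0) ∧
         (squaretest m).contains (PySem.List.pyGetD l j 0) = isSquare (PySem.List.pyGetD l j 0)) := by
      intro j h0 h1
      have hget := PySem.List.pyGetD_eq_getElem l (0 : Int) h0 h1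
      have hmem : PySem.List.pyGetD l j 0 ∈ l := by
        rw [hget]; exact List.getElem_mem _
      have hle := hmax _ hmem
      exact ⟨prime_bridge m _ hle, square_bridge m _ hle⟩
    rw [PySem.List.foldl_append_singleton_eq_map (fun i => PySem.List.pyGetD l i 0),
        PySem.List.foldl_append_singleton_eq_map (fun p => PySem.List.pyGetD l p 0),
        PySem.List.enumerate_eq_map_pyRange l 0]
    simp only [List.nil_append, List.all_map, PySem.List.len_eq]
    have two_pos : (0:Int) < 2 := by norm_num
    have e1 : (PySem.List.pyRange 1 (l.length : Int) 2).all
        ((fun x => (primecheck m).contains x) ∘ fun p => PySem.List.pyGetD l p 0) =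
        (PySem.List.pyRange 1 (l.length : Int) 2).all (fun j => isPrime (PySem.List.pyGetD l j 0)) :=
      all_congr_mem (fun j hj => by
        rcases (PySem.List.mem_pyRange_iff_of_pos two_pos j).mp hj with ⟨h0, h1, _⟩
        exact (hbridge j (by omega) h1).1)
    have e2 : (PySem.List.pyRange 0 (l.length : Int) 2).all
        ((fun y => (squaretest m).contains y) ∘ fun p => PySem.List.pyGetD l p 0) =
        (PySem.List.pyRange 0 (l.length : Int) 2).all (fun j => isSquare (PySem.List.pyGetD l j 0)) :=
      all_congr_mem (fun j hj => by
        rcases (PySem.List.mem_pyRange_iff_of_pos two_pos j).mp hj with ⟨h0, h1, _⟩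
        exact (hbridge j h0 h1).2)
    have e3 : (PySem.List.pyRange 0 (l.length : Int) 2).all
        ((fun x => (primecheck m).contains x) ∘ fun p => PySem.List.pyGetD l p 0) =
        (PySem.List.pyRange 0 (l.length : Int) 2).all (fun j => isPrime (PySem.List.pyGetD l j 0)) :=
      all_congr_mem (fun j hj => by
        rcases (PySem.List.mem_pyRange_iff_of_pos two_pos j).mp hj with ⟨h0, h1, _⟩
        exact (hbridge j h0 h1).1)
    have e4 : (PySem.List.pyRange 1 (l.length : Int) 2).all
        ((fun y => (squaretest m).contains y) ∘ fun p => PySem.List.pyGetD l p 0) =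
        (PySem.List.pyRange 1 (l.length : Int) 2).all (fun j => isSquare (PySem.List.pyGetD l j 0)) :=
      all_congr_mem (fun j hj => by
        rcases (PySem.List.mem_pyRange_iff_of_pos two_pos j).mp hj with ⟨h0, h1, _⟩
        exact (hbridge j (by omega) h1).2)
    have e5 : (PySem.List.pyRange 0 (l.length : Int)).all
        ((fun p => if (PySem.Int.mod p.1 2 == 0) = true then isSquare p.2 else isPrime p.2) ∘ fun j =>
          (j, PySem.List.pyGetD l j 0)) =
        (PySem.List.pyRange 0 (l.length : Int)).all (fun j =>
          if PySem.Int.mod j 2 == 0 then isSquare (PySem.List.pyGetD l j 0) else isPrime (PySem.List.pyGetD l j 0)) :=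
      List.all_congr rfl (fun a => rfl)
    have e6 : (PySem.List.pyRange 0 (l.length : Int)).all
        ((fun p => if (PySem.Int.mod p.1 2 == 0) = true then isPrime p.2 else isSquare p.2) ∘ fun j =>
          (j, PySem.List.pyGetD l j 0)) =
        (PySem.List.pyRange 0 (l.length : Int)).all (fun j =>
          if PySem.Int.mod j 2 == 0 then isPrime (PySem.List.pyGetD l j 0) else isSquare (PySem.List.pyGetD l j 0)) :=
      List.all_congr rfl (fun a => rfl)
    rw [e1, e2, e3, e4, e5, e6, parity_all, parity_all, Bool.and_comm]

-- ===== VERDICT (by name: the statement is the Claim_ definition above) =====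
theorem primesquare_spec : Claim_equal_primesquare := by
  intro l _hdom hpre
  unfold Spec_primesquare
  exact primesquare_main l hpre
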